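-- pv_equiv track=rewrite | github.com/8080509/Permutation-Generators | SymmetricGroups3.py | C3
-- ===== SOURCE A (Python) =====
-- def C3(p,v):
-- 	if not p:
-- 		return 1
-- 	acc = 1
-- 	ops = 0
-- 	for i in range(max(p)+1):
-- 		if i in v: ops += 1
-- 		elif i in p: ops -= 1
-- 		else: acc *= ops
-- 	return acc
-- ===== SOURCE B (Python) =====
-- def C3(p, v):
--     if not p:
--         return 1
--     n = max(p)
--     if n < 0:
--         return 1
--     vs = set(v)
--     ps = set(p)
--     events = sorted(x for x in vs | ps if 0 <= x <= n)
--     acc = 1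
--     ops = 0
--     prev = 0
--     for e in events:
--         acc *= ops ** (e - prev)
--         if e in vs:
--             ops += 1
--         else:
--             ops -= 1
--         prev = e + 1
--     acc *= ops ** (n + 1 - prev)
--     return acc
-- ===== Notes on version B (the rewrite author's own statement) =====
-- stated objective: faster
-- what changed: Instead of scanning every index 0..max(p) with linear membership tests, B sorts the distinct event indices of set(p)|set(v) once and multiplies the accumulator by ops**gap over each event-free gap.
import Mathlib
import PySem

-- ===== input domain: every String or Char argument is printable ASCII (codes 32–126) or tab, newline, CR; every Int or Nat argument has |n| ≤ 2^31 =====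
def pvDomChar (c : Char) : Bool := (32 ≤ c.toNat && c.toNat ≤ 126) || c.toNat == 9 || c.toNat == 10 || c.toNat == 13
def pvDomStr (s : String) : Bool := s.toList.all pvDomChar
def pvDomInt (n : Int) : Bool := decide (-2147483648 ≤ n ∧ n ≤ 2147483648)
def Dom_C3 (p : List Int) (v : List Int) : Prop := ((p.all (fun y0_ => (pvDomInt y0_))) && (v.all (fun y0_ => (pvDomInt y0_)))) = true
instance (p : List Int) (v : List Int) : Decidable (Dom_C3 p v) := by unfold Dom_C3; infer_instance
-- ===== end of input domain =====

-- B replaces A's scan of every index 0..max(p) (with linear membership tests) by one pass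
-- over the sorted distinct event indices of p and v, raising the accumulator to the power
-- of each event-free gap length.

-- ===== PORT A =====
-- A's loop body: if i in v: ops += 1 elif i in p: ops -= 1 else: acc *= ops
def stepA (p : List Int) (v : List Int) (st : Int × Int) (i : Int) : Int × Int :=
  if i ∈ v then (st.1, st.2 + 1)
  else if i ∈ p then (st.1, st.2 - 1)
  else (st.1 * st.2, st.2)

def C3 (p : List Int) (v : List Int) : Int :=
  if p = [] then 1
  else
    match PySem.List.max? p (fun x => x) with
    | none => 1   -- unreachable: p ≠ []
    | some m => ((PySem.List.pyRange 0 (m + 1) 1).foldl (stepA p v) (1, 0)).1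

-- ===== PORT B =====
-- B's loop body over events; state = (acc, ops, prev); exponents are nonnegative on the
-- sorted event list, so `.toNat` is exact for Python's `**` here.
def stepB (vs : List Int) (st : Int × Int × Int) (e : Int) : Int × Int × Int :=
  let acc := st.1 * st.2.1 ^ (e - st.2.2).toNat
  if e ∈ vs then (acc, st.2.1 + 1, e + 1)
  else (acc, st.2.1 - 1, e + 1)

def C3_alt (p : List Int) (v : List Int) : Int :=
  if p = [] then 1
  else
    match PySem.List.max? p (fun x => x) with
    | none => 1   -- unreachable: p ≠ []
    | some n =>
      if n < 0 then 1
      else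
        let vs := PySem.Set.ofList v
        let ps := PySem.Set.ofList p
        let events := PySem.List.sorted
          ((PySem.Set.union vs ps).filter (fun x => decide (0 ≤ x) && decide (x ≤ n)))
          (fun x => x) false
        let st := events.foldl (stepB vs) (1, 0, 0)
        st.1 * st.2.1 ^ (n + 1 - st.2.2).toNat

-- ===== PRECONDITION & SPEC =====
def Spec_C3 (p : List Int) (v : List Int) (out : Int) : Prop := out = C3_alt p v
instance (p : List Int) (v : List Int) (out : Int) : Decidable (Spec_C3 p v out) := by unfold Spec_C3; infer_instance

-- ===== CLAIM (what is proved, stated in full; the proofs are below) =====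
def Claim_equal_C3 : Prop := ∀ (p : List Int) (v : List Int), Dom_C3 p v → Spec_C3 p v (C3 p v)

-- ===== LEMMAS AND PROOFS =====

-- A's fold over an event-free range [a,b) multiplies acc by ops^(b-a) and keeps ops.
lemma foldA_gap (p v : List Int) (a b acc ops : Int)
    (h : ∀ i, a ≤ i → i < b → i ∉ v ∧ i ∉ p) :
    (PySem.List.pyRange a b 1).foldl (stepA p v) (acc, ops)
      = (acc * ops ^ (b - a).toNat, ops) := by
  obtain ⟨k, hk⟩ : ∃ k, (b - a).toNat = k := ⟨_, rfl⟩
  induction k generalizing a acc with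
  | zero =>
      have hba : b ≤ a := by omega
      rw [PySem.List.pyRange_one_eq_nil hba]
      simp [hk]
  | succ k ih =>
      have hab : a < b := by omega
      rw [PySem.List.pyRange_one_cons hab]
      obtain ⟨hv, hp⟩ := h a le_rfl hab
      simp only [List.foldl_cons, stepA, if_neg hv, if_neg hp]
      rw [ih (a + 1) (acc * ops) (fun i h1 h2 => h i (by omega) h2) (by omega)]
      have h1 : (b - (a + 1)).toNat = k := by omega
      rw [h1, hk, pow_succ]
      ring_nf

-- Main invariant: A's fold over [a,b) equals B's fold over the event list of [a,b).
lemma foldA_events (p v : List Int) (b : Int) (es : List Int) (a acc ops : Int)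
    (hsort : es.Pairwise (· < ·))
    (hbnd : ∀ e ∈ es, a ≤ e ∧ e < b)
    (hclose : ∀ i, a ≤ i → i < b → (i ∈ v ∨ i ∈ p) → i ∈ es)
    (hmem : ∀ e ∈ es, e ∈ v ∨ e ∈ p) :
    (PySem.List.pyRange a b 1).foldl (stepA p v) (acc, ops)
      = (let st := es.foldl (stepB (PySem.Set.ofList v)) (acc, ops, a);
         (st.1 * st.2.1 ^ (b - st.2.2).toNat, st.2.1)) := by
  induction es generalizing a acc ops with
  | nil =>
      simp only [List.foldl_nil]
      exact foldA_gap p v a b acc ops (fun i h1 h2 => by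
        constructor <;> intro hm
        · exact (List.not_mem_nil (hclose i h1 h2 (Or.inl hm)))
        · exact (List.not_mem_nil (hclose i h1 h2 (Or.inr hm))))
  | cons e es ih =>
      obtain ⟨hae, heb⟩ := hbnd e (List.mem_cons_self ..)
      have hlt : ∀ x ∈ es, e < x := fun x hx => List.rel_of_pairwise_cons hsort hx
      rw [PySem.List.pyRange_one_append a e b hae (le_of_lt heb),
          PySem.List.pyRange_one_cons heb, List.foldl_append,
          foldA_gap p v a e acc ops (fun i h1 h2 => by
            constructor <;> intro hm
            · rcases List.mem_cons.mp (hclose i h1 (by omega) (Or.inl hm)) with h | h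
              · omega
              · exact absurd (hlt i h) (by omega)
            · rcases List.mem_cons.mp (hclose i h1 (by omega) (Or.inr hm)) with h | h
              · omega
              · exact absurd (hlt i h) (by omega))]
      simp only [List.foldl_cons]
      have hstepB : stepB (PySem.Set.ofList v) (acc, ops, a) e
          = (if e ∈ v then ((acc * ops ^ (e - a).toNat), ops + 1, e + 1)
             else ((acc * ops ^ (e - a).toNat), ops - 1, e + 1)) := by
        simp [stepB, PySem.Set.mem_ofList]
      have ihx := fun acc' ops' => ih (e + 1) acc' ops' (List.Pairwise.sublist (List.sublist_cons_self ..) hsort)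
        (fun x hx => ⟨by have := hlt x hx; omega, (hbnd x (List.mem_cons_of_mem _ hx)).2⟩)
        (fun i h1 h2 hm => by
          rcases List.mem_cons.mp (hclose i (by omega) h2 hm) with h | h
          · omega
          · exact h)
        (fun x hx => hmem x (List.mem_cons_of_mem _ hx))
      by_cases hev : e ∈ v
      · rw [hstepB, if_pos hev]
        simp only [stepA, if_pos hev]
        exact ihx (acc * ops ^ (e - a).toNat) (ops + 1)
      · have hep : e ∈ p := (hmem e (List.mem_cons_self ..)).resolve_left hev
        rw [hstepB, if_neg hev]
        simp only [stepA, if_neg hev, if_pos hep]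
        exact ihx (acc * ops ^ (e - a).toNat) (ops - 1)

-- ===== VERDICT (by name: the statement is the Claim_ definition above) =====
theorem C3_spec : Claim_equal_C3 := by
  intro p v _
  unfold Spec_C3 C3 C3_alt
  by_cases hp : p = []
  · simp [hp]
  · rw [if_neg hp, if_neg hp]
    cases hmax : PySem.List.max? p (fun x => x) with
    | none => rfl
    | some m =>
        dsimp only
        by_cases hm : m < 0
        · rw [if_pos hm, PySem.List.pyRange_one_eq_nil (by omega)]
          rfl
        · rw [if_neg hm]
          set flt := (PySem.Set.union (PySem.Set.ofList v) (PySem.Set.ofList p)).filter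
            (fun x => decide (0 ≤ x) && decide (x ≤ m)) with hflt
          set es := PySem.List.sorted flt (fun x => x) false with hes
          have hmemes : ∀ x, x ∈ es ↔ ((x ∈ v ∨ x ∈ p) ∧ 0 ≤ x ∧ x ≤ m) := by
            intro x
            rw [hes, PySem.List.mem_sorted, hflt, List.mem_filter]
            simp [PySem.Set.mem_union, PySem.Set.mem_ofList]
          have hnd : es.Nodup := by
            rw [hes]
            exact ((PySem.List.sorted_perm flt (fun x => x) false).nodup_iff).mpr
              (List.Nodup.filter _ (PySem.Set.nodup_union _ _ (PySem.Set.nodup_ofList v)))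
          have hsort : es.Pairwise (· < ·) := by
            have hle : es.Pairwise (fun x y => x ≤ y) := PySem.List.sorted_pairwise flt (fun x => x)
            exact (hle.and hnd).imp (fun h => lt_of_le_of_ne h.1 h.2)
          have := foldA_events p v (m + 1) es 0 1 0 hsort
            (fun e he => by have := (hmemes e).mp he; omega)
            (fun i h1 h2 hm2 => (hmemes i).mpr ⟨hm2, h1, by omega⟩)
            (fun e he => ((hmemes e).mp he).1)
          rw [this]
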